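-- pv_equiv track=rewrite | github.com/neoseurae12/python_algorithm | leet_125-1_valid-palindrome.py | isPalindrome
-- ===== SOURCE A (Python) =====
-- def isPalindrome(s: str) -> bool:
--   # make a 'list'
--   result = list()
--   for c in s:
--     if c.isalnum():
--       result.append(c.lower())
--
--   # pop first & last
--   while len(result) > 1:
--     # compare (same/different)
--     if result.pop(0) != result.pop():
--       return False
--
--   return True
-- ===== SOURCE B (Python) =====
-- def isPalindrome(s: str) -> bool:
--   t = [c.lower() for c in s if c.isalnum()]
--   return t == t[::-1]
-- ===== Notes on version B (the rewrite author's own statement) =====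
-- stated objective: simpler
-- what changed: Replaces the pop(0)/pop() shrinking-list comparison loop with building the filtered lowercase list once and comparing it to its reverse.
import Mathlib
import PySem

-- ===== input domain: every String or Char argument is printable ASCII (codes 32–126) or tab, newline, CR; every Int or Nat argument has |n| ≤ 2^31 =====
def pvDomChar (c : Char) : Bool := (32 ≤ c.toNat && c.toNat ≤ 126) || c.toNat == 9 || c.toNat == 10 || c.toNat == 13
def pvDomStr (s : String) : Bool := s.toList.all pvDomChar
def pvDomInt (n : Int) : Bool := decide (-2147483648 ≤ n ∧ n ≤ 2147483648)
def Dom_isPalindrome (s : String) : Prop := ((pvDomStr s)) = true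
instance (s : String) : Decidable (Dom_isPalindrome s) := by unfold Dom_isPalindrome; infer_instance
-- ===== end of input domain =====

-- B builds the filtered lowercase list once and compares it to its reverse,
-- replacing A's pop(0)/pop() shrinking comparison loop (simpler, one pass).


-- ===== PORT A =====
-- the while loop: pop(0) (head) and pop() (last) compared, list shrinks by two
def popLoop : List Char → Bool
  | [] => true
  | [_] => true
  | a :: b :: rest =>
      if a ≠ (b :: rest).getLast (by simp) then false
      else popLoop (b :: rest).dropLast
termination_by l => l.length
decreasing_by simp [List.length_dropLast]

def isPalindrome (s : String) : Bool :=
  let result := s.toList.foldl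
    (fun acc c => if PySem.Chars.isalnum c then acc ++ [PySem.Chars.lowerChar c] else acc) []
  popLoop result

-- ===== PORT B =====
def isPalindrome_alt (s : String) : Bool :=
  let t := (s.toList.filter PySem.Chars.isalnum).map PySem.Chars.lowerChar
  t == t.reverse    -- t[::-1] is the full reverse

-- ===== PRECONDITION & SPEC =====
def Spec_isPalindrome (s : String) (out : Bool) : Prop := out = isPalindrome_alt s
instance (s : String) (out : Bool) : Decidable (Spec_isPalindrome s out) := by unfold Spec_isPalindrome; infer_instance

-- ===== CLAIM (what is proved, stated in full; the proofs are below) =====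
def Claim_equal_isPalindrome : Prop := ∀ (s : String), Dom_isPalindrome s → Spec_isPalindrome s (isPalindrome s)

-- ===== LEMMAS AND PROOFS =====
theorem cons_append_singleton_self_reverse {a b : Char} {zs : List Char} :
    (a :: zs ++ [b] = (a :: zs ++ [b]).reverse) ↔ (a = b ∧ zs = zs.reverse) := by
  simp only [List.reverse_cons, List.reverse_append, List.reverse_cons, List.reverse_nil,
    List.nil_append, List.cons_append, List.cons.injEq]
  constructor
  · rintro ⟨rfl, h⟩
    refine ⟨rfl, ?_⟩
    have := List.append_inj_left h (by simp)
    exact this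
  · rintro ⟨rfl, h⟩
    exact ⟨rfl, by rw [← h]⟩

theorem popLoop_eq_palindrome (l : List Char) : popLoop l = (l == l.reverse) := by
  induction l using popLoop.induct with
  | case1 => simp [popLoop]
  | case2 a => simp [popLoop]
  | case3 a b rest hcmp =>
      have hne : (b :: rest) ≠ [] := by simp
      have hsplit : b :: rest = (b :: rest).dropLast ++ [(b :: rest).getLast hne] :=
        (List.dropLast_append_getLast hne).symm
      rw [popLoop]
      rw [if_pos hcmp]
      symm
      rw [beq_eq_false_iff_ne]
      intro habs
      apply hcmp
      conv at habs => lhs; rw [hsplit]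
      conv at habs => rhs; rw [show a :: (b :: rest) = a :: ((b :: rest).dropLast ++ [(b :: rest).getLast hne]) from by rw [← hsplit]]
      exact (cons_append_singleton_self_reverse.mp habs).1
  | case4 a b rest hcmp ih =>
      have hne : (b :: rest) ≠ [] := by simp
      have hsplit : b :: rest = (b :: rest).dropLast ++ [(b :: rest).getLast hne] :=
        (List.dropLast_append_getLast hne).symm
      rw [popLoop]
      rw [if_neg hcmp]
      have hcmp' : a = (b :: rest).getLast hne := by
        by_contra hc; exact hcmp hc
      have hbd : ∀ (u v : List Char), (u == v) = decide (u = v) := by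
        intro u v; by_cases h : u = v <;> simp [h]
      rw [ih, hbd, hbd, decide_eq_decide]
      conv => rhs; rw [show a :: (b :: rest) = a :: ((b :: rest).dropLast ++ [(b :: rest).getLast hne]) from by rw [← hsplit]]
      rw [show (a :: ((b :: rest).dropLast ++ [(b :: rest).getLast hne])) = (a :: (b :: rest).dropLast ++ [(b :: rest).getLast hne]) from rfl]
      rw [cons_append_singleton_self_reverse]
      simp [hcmp']

-- ===== VERDICT (by name: the statement is the Claim_ definition above) =====
theorem isPalindrome_spec : Claim_equal_isPalindrome := by
  intro s _
  unfold Spec_isPalindrome isPalindrome isPalindrome_alt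
  simp only [PySem.List.foldl_append_if, List.nil_append]
  exact popLoop_eq_palindrome _
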